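-- pv_equiv track=rewrite | github.com/emrementese/dijii-tech-case | case2/case_2.py | getInaccessibleFactory
-- ===== SOURCE A (Python) =====
-- def getInaccessibleFactory(n, c):
--     # Burada case-3 deki FSM ye benzer bir yaklaşım ile  çözüm yapmaya çalıştım.
--     # yine inital bir distance listesi oluşturup bu listeyi tarama yaparak güncelledim
--
--     # en uzağı aradağımız için hepsini ilk başta 0 olarak ayarladım.
--     distances = [0] * n
--
--     # index numarası verilen şegrin en yakın fabrikasını bulmak için
--     find_closest_factory = lambda i: min([ abs(i - j) for j in c])
--
--     for i in range(n):
--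
--         if i not in c:
--             # kendisi bir fabrika değil ise
--             # en yakın fabrikayı bul
--             closest_factory = find_closest_factory(i)
--             distances[i] = closest_factory
--
--     # en uzak şehrin uzaklık mesafesini dön
--     return max(distances)
-- ===== SOURCE B (Python) =====
-- def getInaccessibleFactory(n, c):
--     # Sort the factory positions once; the farthest city is either an endpoint
--     # (city 0 or city n-1) or the clamped midpoint of a gap between two
--     # consecutive factories.  O(len(c) log len(c)) instead of O(n * len(c)).
--     s = sorted(c)
--     nearest = lambda i: min(abs(i - f) for f in s)
--     best = max(nearest(0), nearest(n - 1))
--     for p, q in zip(s, s[1:]):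
--         lo = max(p, 0)
--         hi = min(q, n - 1)
--         if lo <= hi:
--             m = min(max((p + q) // 2, lo), hi)
--             best = max(best, min(m - p, q - m))
--     return best
-- ===== Notes on version B (the rewrite author's own statement) =====
-- stated objective: faster
-- what changed: Instead of scanning all factories for every city (A), B sorts the factory positions once and takes the maximum over the endpoints (city 0 and n-1) and the clamped midpoint of each gap between consecutive factories.
import Mathlib
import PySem

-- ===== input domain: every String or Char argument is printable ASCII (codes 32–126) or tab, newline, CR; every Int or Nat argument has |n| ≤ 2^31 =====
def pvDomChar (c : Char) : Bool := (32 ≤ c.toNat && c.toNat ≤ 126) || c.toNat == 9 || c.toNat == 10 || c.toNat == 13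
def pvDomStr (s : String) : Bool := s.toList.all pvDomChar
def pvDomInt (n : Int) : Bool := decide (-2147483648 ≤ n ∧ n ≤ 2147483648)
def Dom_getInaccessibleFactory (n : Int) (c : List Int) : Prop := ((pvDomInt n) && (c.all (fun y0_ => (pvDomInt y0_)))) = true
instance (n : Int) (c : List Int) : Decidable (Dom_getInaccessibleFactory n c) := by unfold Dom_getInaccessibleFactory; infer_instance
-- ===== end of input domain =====

-- B sorts the factory positions once and maximises over endpoints and clamped gap midpoints
-- instead of scanning all factories for every city (measured asymptotically faster).


-- ===== PORT A =====
-- find_closest_factory = lambda i: min([abs(i - j) for j in c])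
def pvFindClosest (i : Int) (c : List Int) : Int :=
  (PySem.List.min? (c.map (fun j => |i - j|)) (fun y => y)).getD 0

-- loop body: if i not in c: distances[i] = find_closest_factory(i)
def pvStepA (c : List Int) (ds : List Int) (i : Int) : List Int :=
  if i ∉ c then PySem.List.pySetD ds i (pvFindClosest i c) else ds

def getInaccessibleFactory (n : Int) (c : List Int) : Int :=
  let distances := List.replicate n.toNat 0
  let distances := (PySem.List.pyRange 0 n 1).foldl (pvStepA c) distances
  (PySem.List.max? distances (fun y => y)).getD 0

-- ===== PORT B =====
-- nearest = lambda i: min(abs(i - f) for f in s)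
def pvNearest (i : Int) (s : List Int) : Int :=
  (PySem.List.min? (s.map (fun f => |i - f|)) (fun y => y)).getD 0

-- loop body over consecutive sorted pairs (p, q) = pq
def pvStepB (n : Int) (best : Int) (pq : Int × Int) : Int :=
  let lo := max pq.1 0
  let hi := min pq.2 (n - 1)
  if lo ≤ hi then
    let m := min (max (PySem.Int.floordiv (pq.1 + pq.2) 2) lo) hi
    max best (min (m - pq.1) (pq.2 - m))
  else best

def getInaccessibleFactory_alt (n : Int) (c : List Int) : Int :=
  let s := PySem.List.sorted c (fun y => y) false
  let best := max (pvNearest 0 s) (pvNearest (n - 1) s)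
  (s.zip s.tail).foldl (pvStepB n) best

-- ===== PRECONDITION & SPEC =====
-- Pre_ excludes exactly the inputs where the Python A raises ValueError:
-- n ≤ 0 (max of an empty distances list) or c = [] (min of an empty list).
def Pre_getInaccessibleFactory (n : Int) (c : List Int) : Prop := 1 ≤ n ∧ c ≠ []
instance (n : Int) (c : List Int) : Decidable (Pre_getInaccessibleFactory n c) := by
  unfold Pre_getInaccessibleFactory; infer_instance

def pvWitness_getInaccessibleFactory : Int × List Int := (6, [1, 4])

def Spec_getInaccessibleFactory (n : Int) (c : List Int) (out : Int) : Prop := out = getInaccessibleFactory_alt n c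
instance (n : Int) (c : List Int) (out : Int) : Decidable (Spec_getInaccessibleFactory n c out) := by unfold Spec_getInaccessibleFactory; infer_instance

-- ===== CLAIM (what is proved, stated in full; the proofs are below) =====
def Claim_equal_getInaccessibleFactory : Prop := ∀ (n : Int) (c : List Int), Dom_getInaccessibleFactory n c → Pre_getInaccessibleFactory n c → Spec_getInaccessibleFactory n c (getInaccessibleFactory n c)


-- ===== LEMMAS AND PROOFS =====

theorem pvFindClosest_spec (c : List Int) (hc : c ≠ []) (i : Int) :
    (∃ j ∈ c, pvFindClosest i c = |i - j|) ∧ (∀ j ∈ c, pvFindClosest i c ≤ |i - j|) := by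
  have hne : c.map (fun j => |i - j|) ≠ [] := by simpa using hc
  obtain ⟨m, hm⟩ : ∃ m, PySem.List.min? (c.map (fun j => |i - j|)) (fun y => y) = some m := by
    rcases h : PySem.List.min? (c.map (fun j => |i - j|)) (fun y => y) with _ | m
    · exact absurd ((PySem.List.min?_eq_none_iff _ _).mp h) hne
    · exact ⟨m, rfl⟩
  have hmem := PySem.List.min?_mem hm
  have hmin := PySem.List.min?_isMin hm
  rw [List.mem_map] at hmem
  obtain ⟨j, hj, hjm⟩ := hmem
  unfold pvFindClosest
  rw [hm]
  refine ⟨⟨j, hj, by simp [hjm.symm]⟩, fun j' hj' => ?_⟩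
  exact hmin _ (List.mem_map.mpr ⟨j', hj', rfl⟩)

theorem pvNearest_eq_findClosest (c : List Int) (hc : c ≠ []) (i : Int) :
    pvNearest i (PySem.List.sorted c (fun y => y) false) = pvFindClosest i c := by
  set s := PySem.List.sorted c (fun y => y) false with hs
  have hsne : s ≠ [] := by
    have hlen : s.length = c.length := (PySem.List.sorted_perm c (fun y => y) false).length_eq
    intro h; rw [h] at hlen; exact hc (List.eq_nil_of_length_eq_zero hlen.symm)
  have h1 : pvNearest i s = pvFindClosest i s := rfl
  obtain ⟨⟨j, hj, hjv⟩, hmin⟩ := pvFindClosest_spec s hsne i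
  obtain ⟨⟨j', hj', hjv'⟩, hmin'⟩ := pvFindClosest_spec c hc i
  rw [h1]
  refine le_antisymm ?_ ?_
  · rw [hjv']; exact hmin j' ((PySem.List.mem_sorted c _ _ j').mpr hj')
  · rw [hjv]; exact hmin' j ((PySem.List.mem_sorted c _ _ j).mp hj)

theorem foldA_length (c : List Int) (m : Nat) (ds : List Int) :
    ((PySem.List.pyRange 0 (m : Int) 1).foldl (pvStepA c) ds).length = ds.length := by
  induction m generalizing ds with
  | zero => simp [PySem.List.pyRange_one_eq_nil (by omega : (0:Int) ≤ 0)]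
  | succ m ih =>
    rw [show ((m + 1 : Nat) : Int) = (m : Int) + 1 from by push_cast; ring,
      PySem.List.pyRange_one_succ_right (by positivity), List.foldl_append]
    set t := (PySem.List.pyRange 0 (m : Int) 1).foldl (pvStepA c) ds with ht
    have hlt : t.length = ds.length := ih ds
    simp only [List.foldl_cons, List.foldl_nil]
    show (pvStepA c t (m : Int)).length = ds.length
    unfold pvStepA
    split
    · rw [PySem.List.pySetD_natCast, List.length_set, hlt]
    · exact hlt

theorem foldA_getElem? (c : List Int) (m : Nat) (ds : List Int) (k : Nat) (hk : k < ds.length) :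
    ((PySem.List.pyRange 0 (m : Int) 1).foldl (pvStepA c) ds)[k]? =
      some (if (k : Int) < (m : Int) ∧ (k : Int) ∉ c then pvFindClosest (k : Int) c else ds[k]) := by
  induction m generalizing ds with
  | zero =>
    rw [if_neg (by omega)]
    simp [PySem.List.pyRange_one_eq_nil (by omega : (0:Int) ≤ 0), List.getElem?_eq_getElem hk]
  | succ m ih =>
    rw [show ((m + 1 : Nat) : Int) = (m : Int) + 1 from by push_cast; ring,
      PySem.List.pyRange_one_succ_right (by positivity), List.foldl_append]
    set t := (PySem.List.pyRange 0 (m : Int) 1).foldl (pvStepA c) ds with ht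
    have hlt : t.length = ds.length := foldA_length c m ds
    simp only [List.foldl_cons, List.foldl_nil]
    show (pvStepA c t (m : Int))[k]? = _
    unfold pvStepA
    split
    · rename_i hmem
      rw [PySem.List.pySetD_natCast]
      by_cases hkm : k = m
      · subst hkm
        rw [List.getElem?_set_self (by omega), if_pos ⟨by omega, hmem⟩]
      · rw [List.getElem?_set_ne (fun h => hkm h.symm), ih ds hk]
        have hne : (k : Int) ≠ (m : Int) := fun h => hkm (by exact_mod_cast h)
        congr 1
        by_cases h2 : (k : Int) ∈ c
        · simp [h2]
        · simp only [h2, not_false_iff, and_true]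
          rw [if_congr (by omega : ((k:Int) < (m:Int)) ↔ ((k:Int) < (m:Int)+1)) rfl rfl]
    · rename_i hmem
      rw [not_not] at hmem
      rw [ih ds hk]
      congr 1
      by_cases hkm : k = m
      · subst hkm; simp [hmem]
      · have hne : (k : Int) ≠ (m : Int) := fun h => hkm (by exact_mod_cast h)
        by_cases h2 : (k : Int) ∈ c
        · simp [h2]
        · simp only [h2, not_false_iff, and_true]
          rw [if_congr (by omega : ((k:Int) < (m:Int)) ↔ ((k:Int) < (m:Int)+1)) rfl rfl]

theorem pvFindClosest_nonneg (c : List Int) (hc : c ≠ []) (i : Int) :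
    0 ≤ pvFindClosest i c := by
  obtain ⟨⟨j, _, hj⟩, _⟩ := pvFindClosest_spec c hc i
  rw [hj]; exact abs_nonneg _

theorem pvFindClosest_mem (c : List Int) (j : Int) (hj : j ∈ c) (hc : c ≠ []) :
    pvFindClosest j c = 0 := by
  have h := (pvFindClosest_spec c hc j).2 j hj
  simp at h
  exact le_antisymm h (pvFindClosest_nonneg c hc j)

theorem distances_eq (n : Int) (c : List Int) (hn : 1 ≤ n) (hc : c ≠ []) :
    (PySem.List.pyRange 0 n 1).foldl (pvStepA c) (List.replicate n.toNat 0) =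
      (List.range n.toNat).map (fun k : Nat => pvFindClosest (k : Int) c) := by
  have hn' : ((n.toNat : Nat) : Int) = n := by omega
  have hrange : PySem.List.pyRange 0 n 1 = PySem.List.pyRange 0 ((n.toNat : Nat) : Int) 1 := by
    rw [hn']
  rw [hrange]
  apply List.ext_getElem?
  intro k
  by_cases hk : k < n.toNat
  · rw [foldA_getElem? c n.toNat _ k (by simpa using hk)]
    have hrhs : ((List.range n.toNat).map (fun k : Nat => pvFindClosest (k : Int) c))[k]? =
        some (pvFindClosest (k : Int) c) := by
      simp [List.getElem?_eq_getElem (by simpa using hk :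
        k < ((List.range n.toNat).map (fun k : Nat => pvFindClosest (k : Int) c)).length)]
    rw [hrhs]
    congr 1
    rw [List.getElem_replicate]
    by_cases hkc : (k : Int) ∈ c
    · rw [if_neg (by simp [hkc]), pvFindClosest_mem c _ hkc hc]
    · rw [if_pos ⟨by omega, hkc⟩]
  · rw [List.getElem?_eq_none, List.getElem?_eq_none]
    · simpa using hk
    · rw [foldA_length, List.length_replicate]; omega

theorem zip_tail_getElem {s : List Int} {pq : Int × Int} (h : pq ∈ s.zip s.tail) :
    ∃ k : Nat, ∃ hk : k + 1 < s.length, pq.1 = s[k] ∧ pq.2 = s[k + 1] := by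
  obtain ⟨k, hk, hget⟩ := List.getElem_of_mem h
  have hlen : (s.zip s.tail).length = min s.length s.tail.length := List.length_zip
  have htl : s.tail.length = s.length - 1 := List.length_tail
  have hk1 : k + 1 < s.length := by omega
  have hz : (s.zip s.tail)[k] = (s[k]'(by omega), s.tail[k]'(by omega)) := List.getElem_zip
  have ht : s.tail[k]'(by omega) = s[k + 1] := List.getElem_tail _
  rw [hz, ht] at hget
  exact ⟨k, hk1, congrArg Prod.fst hget.symm, congrArg Prod.snd hget.symm⟩

theorem between_consecutive (c : List Int) {pq : Int × Int}
    (h : pq ∈ (PySem.List.sorted c (fun y => y) false).zip (PySem.List.sorted c (fun y => y) false).tail) :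
    pq.1 ≤ pq.2 ∧ ∀ f ∈ c, f ≤ pq.1 ∨ pq.2 ≤ f := by
  set s := PySem.List.sorted c (fun y => y) false with hs
  obtain ⟨k, hk, h1, h2⟩ := zip_tail_getElem h
  have hpw : List.Pairwise (fun a b : Int => a ≤ b) s := PySem.List.sorted_pairwise c (fun y => y)
  rw [List.pairwise_iff_getElem] at hpw
  constructor
  · rw [h1, h2]; exact hpw k (k+1) (by omega) hk (by omega)
  · intro f hf
    have hfs : f ∈ s := (PySem.List.mem_sorted c _ _ f).mpr hf
    obtain ⟨j, hj, hget⟩ := List.getElem_of_mem hfs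
    by_cases hjk : j ≤ k
    · left
      rw [h1, ← hget]
      rcases Nat.eq_or_lt_of_le hjk with rfl | hlt
      · exact le_refl _
      · exact hpw j k hj (by omega) hlt
    · right
      rw [h2, ← hget]
      rcases Nat.eq_or_lt_of_le (by omega : k + 1 ≤ j) with heq | hlt
      · subst heq; exact le_refl _
      · exact hpw (k+1) j hk hj hlt

theorem cover (s : List Int) : ∀ (a i : Int), a ≤ i → i ≤ (a :: s).getLast (by simp) →
    (a :: s).length = 1 ∨ ∃ pq ∈ (a :: s).zip s, pq.1 ≤ i ∧ i ≤ pq.2 := by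
  induction s with
  | nil => intro a i _ _; left; rfl
  | cons b t ih =>
    intro a i hai hlast
    right
    by_cases hib : i ≤ b
    · exact ⟨(a, b), by simp [List.zip], ⟨hai, hib⟩⟩
    · have hbi : b ≤ i := by omega
      have hlast' : i ≤ (b :: t).getLast (by simp) := by
        rwa [List.getLast_cons_cons] at hlast  -- guess the lemma name
      rcases ih b i hbi hlast' with h1 | ⟨pq, hpq, hle⟩
      · simp at h1; subst h1
        have : (b :: ([] : List Int)).getLast (by simp) = b := rfl
        rw [this] at hlast'; omega
      · exact ⟨pq, by simp [List.zip]; right; simpa [List.zip] using hpq, hle⟩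

theorem pvStepB_ge (n : Int) (b : Int) (pq : Int × Int) : b ≤ pvStepB n b pq := by
  unfold pvStepB; dsimp only; split
  · exact le_max_left _ _
  · exact le_refl _

theorem foldB_ge_init (n : Int) (l : List (Int × Int)) (init : Int) :
    init ≤ l.foldl (pvStepB n) init := by
  induction l generalizing init with
  | nil => exact le_refl _
  | cons pq l ih => exact le_trans (pvStepB_ge n init pq) (ih _)

theorem foldB_ge_mem (n : Int) (l : List (Int × Int)) (init : Int) {pq : Int × Int}
    (h : pq ∈ l) (hg : max pq.1 0 ≤ min pq.2 (n - 1)) :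
    min (min (max (PySem.Int.floordiv (pq.1 + pq.2) 2) (max pq.1 0)) (min pq.2 (n - 1)) - pq.1)
        (pq.2 - min (max (PySem.Int.floordiv (pq.1 + pq.2) 2) (max pq.1 0)) (min pq.2 (n - 1))) ≤
      l.foldl (pvStepB n) init := by
  induction l generalizing init with
  | nil => cases h
  | cons pq' l ih =>
    rcases List.mem_cons.mp h with rfl | hmem
    · refine le_trans ?_ (foldB_ge_init n l (pvStepB n init pq))
      unfold pvStepB; dsimp only
      rw [if_pos hg]
      exact le_max_right _ _
    · exact ih _ hmem

theorem foldB_le (n : Int) (l : List (Int × Int)) (init M : Int) (h0 : init ≤ M)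
    (h : ∀ pq ∈ l, max pq.1 0 ≤ min pq.2 (n - 1) →
      min (min (max (PySem.Int.floordiv (pq.1 + pq.2) 2) (max pq.1 0)) (min pq.2 (n - 1)) - pq.1)
          (pq.2 - min (max (PySem.Int.floordiv (pq.1 + pq.2) 2) (max pq.1 0)) (min pq.2 (n - 1))) ≤ M) :
    l.foldl (pvStepB n) init ≤ M := by
  induction l generalizing init with
  | nil => exact h0
  | cons pq l ih =>
    refine ih (pvStepB n init pq) ?_ (fun pq' h' hg => h pq' (List.mem_cons_of_mem _ h') hg)
    unfold pvStepB; dsimp only; split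
    · rename_i hg
      exact max_le h0 (h pq (List.mem_cons_self) hg)
    · exact h0

theorem sorted_ne_nil (c : List Int) (hc : c ≠ []) :
    PySem.List.sorted c (fun y => y) false ≠ [] := by
  have hlen : (PySem.List.sorted c (fun y => y) false).length = c.length :=
    (PySem.List.sorted_perm c (fun y => y) false).length_eq
  intro h; rw [h] at hlen; exact hc (List.eq_nil_of_length_eq_zero hlen.symm)

theorem mid_bounds (n p q : Int) (hpq : p ≤ q) (hg : max p 0 ≤ min q (n - 1)) :
    p ≤ min (max (PySem.Int.floordiv (p + q) 2) (max p 0)) (min q (n - 1)) ∧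
    min (max (PySem.Int.floordiv (p + q) 2) (max p 0)) (min q (n - 1)) ≤ q ∧
    0 ≤ min (max (PySem.Int.floordiv (p + q) 2) (max p 0)) (min q (n - 1)) ∧
    min (max (PySem.Int.floordiv (p + q) 2) (max p 0)) (min q (n - 1)) ≤ n - 1 := by
  have h2 := (PySem.Int.floordiv_eq_iff_of_pos (a := p + q) (b := 2)
    (q := PySem.Int.floordiv (p + q) 2) (by norm_num)).mp rfl
  omega

theorem mid_opt (n p q i : Int) (hp : p ≤ i) (hq : i ≤ q) (h0 : 0 ≤ i) (hn : i ≤ n - 1) :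
    min (i - p) (q - i) ≤
      min (min (max (PySem.Int.floordiv (p + q) 2) (max p 0)) (min q (n - 1)) - p)
          (q - min (max (PySem.Int.floordiv (p + q) 2) (max p 0)) (min q (n - 1))) := by
  have h2 := (PySem.Int.floordiv_eq_iff_of_pos (a := p + q) (b := 2)
    (q := PySem.Int.floordiv (p + q) 2) (by norm_num)).mp rfl
  omega

theorem findClosest_le_alt (n : Int) (c : List Int) (hn : 1 ≤ n) (hc : c ≠ [])
    (i : Int) (h0 : 0 ≤ i) (h1 : i ≤ n - 1) :
    pvFindClosest i c ≤ getInaccessibleFactory_alt n c := by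
  obtain ⟨s, hs⟩ : ∃ s', s' = PySem.List.sorted c (fun y => y) false := ⟨_, rfl⟩
  have hsne : s ≠ [] := by rw [hs]; exact sorted_ne_nil c hc
  have hpw : List.Pairwise (fun a b : Int => a ≤ b) s := by
    rw [hs]; exact PySem.List.sorted_pairwise c (fun y => y)
  rw [List.pairwise_iff_getElem] at hpw
  have hslen : 0 < s.length := List.length_pos_iff.mpr hsne
  have hinit : getInaccessibleFactory_alt n c =
      (s.zip s.tail).foldl (pvStepB n) (max (pvNearest 0 s) (pvNearest (n - 1) s)) := by
    rw [hs]; rfl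
  have hmems : ∀ f, f ∈ s ↔ f ∈ c := by
    intro f; rw [hs]; exact PySem.List.mem_sorted c _ _ f
  have hd0 : pvNearest 0 s = pvFindClosest 0 c := by
    rw [hs]; exact pvNearest_eq_findClosest c hc 0
  have hdn : pvNearest (n - 1) s = pvFindClosest (n - 1) c := by
    rw [hs]; exact pvNearest_eq_findClosest c hc _
  rw [hinit]
  by_cases hlow : i ≤ s[0]
  · -- i is left of (or at) the leftmost factory: d i ≤ d 0
    refine le_trans ?_ (le_trans (le_max_left _ (pvNearest (n-1) s)) (foldB_ge_init n _ _))
    rw [hd0]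
    obtain ⟨⟨f0, hf0, hf0v⟩, _⟩ := pvFindClosest_spec c hc 0
    have hf0s : f0 ∈ s := (hmems f0).mpr hf0
    obtain ⟨j, hj, hjget⟩ := List.getElem_of_mem hf0s
    have hs0 : s[0] ≤ f0 := by
      rcases Nat.eq_zero_or_pos j with rfl | hjp
      · rw [hjget]
      · rw [← hjget]; exact hpw 0 j hslen hj hjp
    have hle := (pvFindClosest_spec c hc i).2 f0 hf0
    rw [hf0v]
    have ha1 : |i - f0| = f0 - i := by rw [abs_of_nonpos (by omega)]; ring
    have ha2 : |(0 : Int) - f0| = f0 := by rw [abs_of_nonpos (by omega)]; ring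
    omega
  · by_cases hhigh : s.getLast hsne ≤ i
    · -- i is right of the rightmost factory: d i ≤ d (n-1)
      refine le_trans ?_ (le_trans (le_max_right (pvNearest 0 s) _) (foldB_ge_init n _ _))
      rw [hdn]
      obtain ⟨⟨f0, hf0, hf0v⟩, _⟩ := pvFindClosest_spec c hc (n - 1)
      have hf0s : f0 ∈ s := (hmems f0).mpr hf0
      obtain ⟨j, hj, hjget⟩ := List.getElem_of_mem hf0s
      have hlastget : s.getLast hsne = s[s.length - 1]'(by omega) := List.getLast_eq_getElem hsne
      have hfle : f0 ≤ s.getLast hsne := by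
        rw [hlastget, ← hjget]
        rcases Nat.eq_or_lt_of_le (by omega : j ≤ s.length - 1) with heq | hlt
        · subst heq; exact le_refl _
        · exact hpw j (s.length - 1) hj (by omega) hlt
      have hle := (pvFindClosest_spec c hc i).2 f0 hf0
      rw [hf0v]
      have ha1 : |i - f0| = i - f0 := abs_of_nonneg (by omega)
      have ha2 : |n - 1 - f0| = n - 1 - f0 := abs_of_nonneg (by omega)
      omega
    · -- i lies strictly between two consecutive factories
      obtain ⟨a, rest, rfl⟩ : ∃ a rest, s = a :: rest := by
        cases s with
        | nil => exact absurd rfl hsne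
        | cons a rest => exact ⟨a, rest, rfl⟩
      have ha : a ≤ i := by simpa using le_of_lt (lt_of_not_ge hlow)
      have hil : i ≤ (a :: rest).getLast (by simp) := le_of_lt (lt_of_not_ge hhigh)
      rcases cover rest a i ha hil with hlen1 | ⟨pq, hpq, hple, hqle⟩
      · -- a single factory: contradiction with hlow < i < getLast
        have hrnil : rest = [] := by simpa using hlen1
        subst hrnil
        simp at hlow hhigh
        omega
      · have hpqzip : pq ∈ (a :: rest).zip (a :: rest).tail := by simpa using hpq
        have hguard : max pq.1 0 ≤ min pq.2 (n - 1) := by omega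
        refine le_trans ?_ (foldB_ge_mem n _ _ hpqzip hguard)
        refine le_trans ?_ (mid_opt n pq.1 pq.2 i hple hqle h0 h1)
        obtain ⟨k, hk, hp1, hp2⟩ := zip_tail_getElem hpqzip
        have hpmem : pq.1 ∈ c := by
          rw [hp1]; exact (hmems _).mp (List.getElem_mem _)
        have hqmem : pq.2 ∈ c := by
          rw [hp2]; exact (hmems _).mp (List.getElem_mem _)
        have hle1 := (pvFindClosest_spec c hc i).2 pq.1 hpmem
        have hle2 := (pvFindClosest_spec c hc i).2 pq.2 hqmem
        have ha1 : |i - pq.1| = i - pq.1 := abs_of_nonneg (by omega)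
        have ha2 : |i - pq.2| = pq.2 - i := by rw [abs_of_nonpos (by omega)]; ring
        omega

theorem alt_le (n : Int) (c : List Int) (hn : 1 ≤ n) (hc : c ≠ []) (M : Int)
    (h : ∀ i : Int, 0 ≤ i → i ≤ n - 1 → pvFindClosest i c ≤ M) :
    getInaccessibleFactory_alt n c ≤ M := by
  obtain ⟨s, hs⟩ : ∃ s', s' = PySem.List.sorted c (fun y => y) false := ⟨_, rfl⟩
  have hinit : getInaccessibleFactory_alt n c =
      (s.zip s.tail).foldl (pvStepB n) (max (pvNearest 0 s) (pvNearest (n - 1) s)) := by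
    rw [hs]; rfl
  have hd0 : pvNearest 0 s = pvFindClosest 0 c := by
    rw [hs]; exact pvNearest_eq_findClosest c hc 0
  have hdn : pvNearest (n - 1) s = pvFindClosest (n - 1) c := by
    rw [hs]; exact pvNearest_eq_findClosest c hc _
  rw [hinit]
  apply foldB_le
  · rw [hd0, hdn]
    exact max_le (h 0 (le_refl _) (by omega)) (h (n-1) (by omega) (le_refl _))
  · intro pq hpq hg
    have hbc : pq.1 ≤ pq.2 ∧ ∀ f ∈ c, f ≤ pq.1 ∨ pq.2 ≤ f := by
      apply between_consecutive c
      rw [← hs]; exact hpq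
    obtain ⟨hpqle, hsep⟩ := hbc
    obtain ⟨hpm, hmq, hm0, hmn⟩ := mid_bounds n pq.1 pq.2 hpqle hg
    set m := min (max (PySem.Int.floordiv (pq.1 + pq.2) 2) (max pq.1 0)) (min pq.2 (n - 1)) with hm
    refine le_trans ?_ (h m hm0 hmn)
    obtain ⟨⟨f0, hf0, hf0v⟩, _⟩ := pvFindClosest_spec c hc m
    rw [hf0v]
    rcases hsep f0 hf0 with hfp | hfq
    · have : |m - f0| = m - f0 := abs_of_nonneg (by omega)
      omega
    · have : |m - f0| = f0 - m := by rw [abs_of_nonpos (by omega)]; ring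
      omega

theorem getInaccessibleFactory_main (n : Int) (c : List Int)
    (hn : 1 ≤ n) (hc : c ≠ []) :
    getInaccessibleFactory n c = getInaccessibleFactory_alt n c := by
  have hA : getInaccessibleFactory n c =
      (PySem.List.max? ((List.range n.toNat).map (fun k : Nat => pvFindClosest (k : Int) c))
        (fun y => y)).getD 0 := by
    show (PySem.List.max? ((PySem.List.pyRange 0 n 1).foldl (pvStepA c)
      (List.replicate n.toNat 0)) (fun y => y)).getD 0 = _
    rw [distances_eq n c hn hc]
  have hLne : (List.range n.toNat).map (fun k : Nat => pvFindClosest (k : Int) c) ≠ [] := by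
    simp; omega
  obtain ⟨M, hM⟩ : ∃ M, PySem.List.max? ((List.range n.toNat).map
      (fun k : Nat => pvFindClosest (k : Int) c)) (fun y => y) = some M := by
    rcases hmx : PySem.List.max? ((List.range n.toNat).map
      (fun k : Nat => pvFindClosest (k : Int) c)) (fun y => y) with _ | M
    · exact absurd ((PySem.List.max?_eq_none_iff _ _).mp hmx) hLne
    · exact ⟨M, rfl⟩
  rw [hA, hM, Option.getD_some]
  have hmem := PySem.List.max?_mem hM
  have hmax := PySem.List.max?_isMax hM
  rw [List.mem_map] at hmem
  obtain ⟨k, hk, hkM⟩ := hmem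
  rw [List.mem_range] at hk
  apply le_antisymm
  · rw [← hkM]
    exact findClosest_le_alt n c hn hc (k : Int) (by positivity) (by omega)
  · apply alt_le n c hn hc
    intro i hi0 hi1
    have hiN : i.toNat < n.toNat := by omega
    have := hmax _ (List.mem_map.mpr ⟨i.toNat, List.mem_range.mpr hiN, rfl⟩)
    simpa [Int.toNat_of_nonneg hi0] using this

-- ===== VERDICT (by name: the statement is the Claim_ definition above) =====
theorem getInaccessibleFactory_spec : Claim_equal_getInaccessibleFactory := by
  intro n c _ hpre
  exact getInaccessibleFactory_main n c hpre.1 hpre.2
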